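-- pv_equiv track=rewrite | github.com/byter11/leetcode | 1740880196-2025-03-02 06.49.56-apply-operations-to-an-array/2025-03-02 06.49.56 - Accepted - runtime 0ms - memory 17.9MB.py | applyOperations
-- ===== SOURCE A (Python) =====
-- from typing import List
--
-- def applyOperations(nums: List[int]) -> List[int]:
--     for i in range(len(nums)-1):
--         if nums[i] == nums[i+1]:
--             nums[i] *= 2
--             nums[i+1] = 0
--
--     ans = []
--     z = []
--     for n in nums:
--         if n != 0:
--             ans.append(n)
--         else: z.append(n)
--     return ans + z
-- ===== SOURCE B (Python) =====
-- from typing import List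
--
-- def applyOperations(nums: List[int]) -> List[int]:
--     # One pass with a pending element: merge equal adjacent pairs without
--     # index arithmetic or mutation, then pad the non-zeros with zeros.
--     merged = []
--     pending = None
--     for x in nums:
--         if pending is None:
--             pending = x
--         elif pending == x:
--             merged.append(pending * 2)
--             pending = 0
--         else:
--             merged.append(pending)
--             pending = x
--     if pending is not None:
--         merged.append(pending)
--     nonzero = [x for x in merged if x != 0]
--     return nonzero + [0] * (len(merged) - len(nonzero))
-- ===== Notes on version B (the rewrite author's own statement) =====
-- stated objective: alternative
-- what changed: A's index-based in-place merge loop plus a two-accumulator partition pass is replaced by a single mutation-free pass carrying a pending element that merges equal neighbours on the fly, followed by a filter of the non-zeros padded with the counted zeros; B does not mutate nums (A does), the proved equivalence is about the return value.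
import Mathlib
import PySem

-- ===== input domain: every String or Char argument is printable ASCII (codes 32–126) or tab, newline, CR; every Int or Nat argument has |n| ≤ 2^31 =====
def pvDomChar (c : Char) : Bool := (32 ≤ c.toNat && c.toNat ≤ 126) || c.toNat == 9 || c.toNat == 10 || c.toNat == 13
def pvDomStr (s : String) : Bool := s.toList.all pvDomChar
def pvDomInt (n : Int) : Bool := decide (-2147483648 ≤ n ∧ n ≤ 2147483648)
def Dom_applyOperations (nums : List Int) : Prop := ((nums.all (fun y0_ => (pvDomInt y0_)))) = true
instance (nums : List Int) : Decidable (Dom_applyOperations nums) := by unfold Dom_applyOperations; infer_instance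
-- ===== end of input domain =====

-- B replaces A's index-based in-place merge loop + two-accumulator partition by one
-- mutation-free pass with a pending element, then filter + zero padding (alternative
-- decomposition, same cost). A mutates nums in place; B does not: the equivalence
-- proved here is about the RETURN value only.

-- ===== PORT A =====
-- for i in range(len(nums)-1): if nums[i]==nums[i+1]: nums[i]*=2; nums[i+1]=0
-- then the ans/z partition pass and ans + z.
def applyOperations (nums : List Int) : List Int :=
  let merged := (PySem.List.pyRange 0 ((nums.length : Int) - 1) 1).foldl
    (fun l i =>
      if PySem.List.pyGetD l i 0 = PySem.List.pyGetD l (i + 1) 0 then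
        PySem.List.pySetD (PySem.List.pySetD l i (PySem.List.pyGetD l i 0 * 2)) (i + 1) 0
      else l) nums
  let p := merged.foldl
    (fun (pr : List Int × List Int) n =>
      if n ≠ 0 then (pr.1 ++ [n], pr.2) else (pr.1, pr.2 ++ [n])) ([], [])
  p.1 ++ p.2

-- ===== PORT B =====
-- the loop body of Source B: state = (merged, pending)
def mergeStep (st : List Int × Option Int) (x : Int) : List Int × Option Int :=
  match st.2 with
  | none => (st.1, some x)
  | some p => if p = x then (st.1 ++ [p * 2], some 0) else (st.1 ++ [p], some x)

def applyOperations_alt (nums : List Int) : List Int :=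
  let st := nums.foldl mergeStep ([], none)
  let merged := st.1 ++ st.2.toList          -- "if pending is not None: merged.append(pending)"
  let nonzero := merged.filter (fun x => decide (x ≠ 0))
  nonzero ++ List.replicate (merged.length - nonzero.length) 0

-- ===== PRECONDITION & SPEC =====
def Spec_applyOperations (nums : List Int) (out : List Int) : Prop := out = applyOperations_alt nums
instance (nums : List Int) (out : List Int) : Decidable (Spec_applyOperations nums out) := by unfold Spec_applyOperations; infer_instance

-- ===== CLAIM (what is proved, stated in full; the proofs are below) =====
def Claim_equal_applyOperations : Prop := ∀ (nums : List Int), Dom_applyOperations nums → Spec_applyOperations nums (applyOperations nums)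

-- ===== LEMMAS AND PROOFS =====

-- specification of the adjacent-merge phase shared by both proofs
def mergeRec : List Int → List Int
  | [] => []
  | [x] => [x]
  | x :: y :: r => if x = y then x * 2 :: mergeRec (0 :: r) else x :: mergeRec (y :: r)
termination_by l => l.length
decreasing_by all_goals simp

theorem mergeRec_nil : mergeRec [] = [] := by simp [mergeRec]
theorem mergeRec_single (x : Int) : mergeRec [x] = [x] := by simp [mergeRec]
theorem mergeRec_cons2 (x y : Int) (r : List Int) :
    mergeRec (x :: y :: r) = if x = y then x * 2 :: mergeRec (0 :: r) else x :: mergeRec (y :: r) := by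
  rw [mergeRec]

theorem pv_getD_at (p : List Int) (x : Int) (t : List Int) (d : Int) :
    (p ++ x :: t).getD p.length d = x := by
  induction p with
  | nil => rfl
  | cons a p ih => simpa using ih

theorem pv_set_at (p : List Int) (x : Int) (t : List Int) (v : Int) :
    (p ++ x :: t).set p.length v = p ++ v :: t := by
  induction p with
  | nil => rfl
  | cons a p ih => simpa using ih

-- A's index loop, generalized over a processed prefix p
theorem pv_loopA (rest p : List Int) :
    (PySem.List.pyRange (p.length : Int) ((p.length : Int) + (rest.length : Int) - 1) 1).foldl
      (fun l i =>
        if PySem.List.pyGetD l i 0 = PySem.List.pyGetD l (i + 1) 0 then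
          PySem.List.pySetD (PySem.List.pySetD l i (PySem.List.pyGetD l i 0 * 2)) (i + 1) 0
        else l) (p ++ rest) = p ++ mergeRec rest := by
  induction rest using mergeRec.induct generalizing p with
  | case1 =>
    rw [PySem.List.pyRange_one_eq_nil (by simp)]
    simp [mergeRec_nil]
  | case2 x =>
    rw [PySem.List.pyRange_one_eq_nil (by simp)]
    simp [mergeRec_single]
  | case3 y r ih =>
    rw [PySem.List.pyRange_one_cons (by simp; omega), List.foldl_cons]
    have hx : PySem.List.pyGetD (p ++ y :: y :: r) (p.length : Int) 0 = y := by
      rw [PySem.List.pyGetD_natCast]; exact pv_getD_at p y (y :: r) 0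
    have hy : PySem.List.pyGetD (p ++ y :: y :: r) ((p.length : Int) + 1) 0 = y := by
      have h1 : ((p.length : Int) + 1) = ((p.length + 1 : Nat) : Int) := by push_cast; ring
      rw [h1, PySem.List.pyGetD_natCast]
      have h2 : (p ++ y :: y :: r) = (p ++ [y]) ++ y :: r := by simp
      rw [h2]
      have := pv_getD_at (p ++ [y]) y r 0
      simpa using this
    rw [hx, hy, if_pos rfl]
    have hset : PySem.List.pySetD (PySem.List.pySetD (p ++ y :: y :: r) (p.length : Int) (y * 2))
        ((p.length : Int) + 1) 0 = (p ++ [y * 2]) ++ 0 :: r := by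
      rw [PySem.List.pySetD_natCast, pv_set_at]
      have h1 : ((p.length : Int) + 1) = ((p.length + 1 : Nat) : Int) := by push_cast; ring
      rw [h1, PySem.List.pySetD_natCast]
      have h2 : p ++ y * 2 :: y :: r = (p ++ [y * 2]) ++ y :: r := by simp
      rw [h2]
      have h3 := pv_set_at (p ++ [y * 2]) y r 0
      simp only [List.length_append, List.length_cons, List.length_nil] at h3
      simpa using h3
    rw [hset]
    have harg : (p.length : Int) + 1 = (((p ++ [y * 2]).length : Nat) : Int) := by simp
    have hub : (p.length : Int) + (((y : Int) :: y :: r).length : Int) - 1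
        = (((p ++ [y * 2]).length : Nat) : Int) + (((0 : Int) :: r).length : Int) - 1 := by
      simp; ring
    rw [harg, hub, ih]
    simp [mergeRec_cons2]
  | case4 x y r hxy ih =>
    rw [PySem.List.pyRange_one_cons (by simp; omega), List.foldl_cons]
    have hx : PySem.List.pyGetD (p ++ x :: y :: r) (p.length : Int) 0 = x := by
      rw [PySem.List.pyGetD_natCast]; exact pv_getD_at p x (y :: r) 0
    have hy : PySem.List.pyGetD (p ++ x :: y :: r) ((p.length : Int) + 1) 0 = y := by
      have h1 : ((p.length : Int) + 1) = ((p.length + 1 : Nat) : Int) := by push_cast; ring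
      rw [h1, PySem.List.pyGetD_natCast]
      have h2 : (p ++ x :: y :: r) = (p ++ [x]) ++ y :: r := by simp
      rw [h2]
      have := pv_getD_at (p ++ [x]) y r 0
      simpa using this
    rw [hx, hy, if_neg hxy]
    have h2 : p ++ x :: y :: r = (p ++ [x]) ++ y :: r := by simp
    have harg : (p.length : Int) + 1 = (((p ++ [x]).length : Nat) : Int) := by simp
    have hub : (p.length : Int) + (((x : Int) :: y :: r).length : Int) - 1
        = (((p ++ [x]).length : Nat) : Int) + (((y : Int) :: r).length : Int) - 1 := by
      simp; ring
    rw [h2, harg, hub, ih]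
    simp [mergeRec_cons2, hxy]

-- B's pending-element pass computes mergeRec
theorem pv_loopB (xs : List Int) (pnd : Int) (acc : List Int) :
    (xs.foldl mergeStep (acc, some pnd)).1 ++ (xs.foldl mergeStep (acc, some pnd)).2.toList
      = acc ++ mergeRec (pnd :: xs) := by
  induction xs generalizing pnd acc with
  | nil => simp [mergeRec_single]
  | cons x xs ih =>
    by_cases h : pnd = x
    · simp only [List.foldl_cons, mergeStep, if_pos h]
      rw [ih]
      simp [mergeRec_cons2, h]
    · simp only [List.foldl_cons, mergeStep, if_neg h]
      rw [ih]
      simp [mergeRec_cons2, h]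

-- A's partition fold, characterised by filters
theorem pv_partition_fold (xs : List Int) (p q : List Int) :
    xs.foldl (fun (pr : List Int × List Int) n =>
        if n ≠ 0 then (pr.1 ++ [n], pr.2) else (pr.1, pr.2 ++ [n])) (p, q)
      = (p ++ xs.filter (fun n => decide (¬ n = 0)), q ++ xs.filter (fun n => decide (n = 0))) := by
  induction xs generalizing p q with
  | nil => simp
  | cons x xs ih =>
    by_cases hx : x = 0
    · rw [List.foldl_cons, if_neg (not_not_intro hx), ih]
      simp [hx, List.append_assoc]
    · rw [List.foldl_cons, if_pos hx, ih]
      simp [hx]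

-- the zeros kept by A are exactly B's replicate padding
theorem pv_zeros (l : List Int) :
    l.filter (fun n => decide (n = 0))
      = List.replicate (l.length - (l.filter (fun x => decide (¬ x = 0))).length) 0 := by
  induction l with
  | nil => rfl
  | cons x xs ih =>
    by_cases hx : x = 0
    · have hle : (xs.filter (fun x => !decide (x = 0))).length ≤ xs.length :=
        List.length_filter_le _ _
      simp only [List.filter_cons, hx]
      simp only [decide_true, decide_false, not_true,
        decide_not] at *
      rw [ih]
      simp [List.length_cons, Nat.succ_sub hle, List.replicate_succ]
    · simp only [List.filter_cons, decide_not] at *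
      simp [hx, ih]

-- ===== VERDICT (by name: the statement is the Claim_ definition above) =====
theorem applyOperations_spec : Claim_equal_applyOperations := by
  intro nums _
  show applyOperations nums = applyOperations_alt nums
  unfold applyOperations applyOperations_alt
  have hA : (PySem.List.pyRange 0 ((nums.length : Int) - 1) 1).foldl
      (fun l i =>
        if PySem.List.pyGetD l i 0 = PySem.List.pyGetD l (i + 1) 0 then
          PySem.List.pySetD (PySem.List.pySetD l i (PySem.List.pyGetD l i 0 * 2)) (i + 1) 0
        else l) nums = mergeRec nums := by
    have := pv_loopA nums []
    simpa using this
  have hB : (nums.foldl mergeStep ([], none)).1 ++ (nums.foldl mergeStep ([], none)).2.toList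
      = mergeRec nums := by
    cases nums with
    | nil => simp [mergeRec_nil]
    | cons x xs =>
      simp only [List.foldl_cons, mergeStep]
      simpa using pv_loopB xs x []
  simp only [hA, hB]
  rw [pv_partition_fold (mergeRec nums) [] []]
  simp only [List.nil_append]
  rw [pv_zeros (mergeRec nums)]
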